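-- pv_equiv track=rewrite | github.com/Mokhles-Abdelmonem/fastapi-react--socketio-mui-games | backend/sockets/chess_calc.py | is_safe_from_knight
-- ===== SOURCE A (Python) =====
-- def get_enemies_list(piece, king=None):
--     whitelist = ["P", "N", "B", "R", "Q"]
--     blacklist = ["p", "n", "b", "r", "q"]
--
--     if king :
--         if piece == "K" :
--             return blacklist
--         elif piece == "k":
--             return whitelist
--
--     if piece in whitelist :
--         return blacklist
--     else :
--         return whitelist
--
-- def knight_available_moves(chess_board, r_index, c_index, piece):
--     enemies_list = get_enemies_list(piece)
--     enemies_king = "K" if piece == "n" else "k"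
--     moves = []
--     moveslist = [
--         [r_index+1, c_index+2],
--         [r_index-1, c_index+2],
--         [r_index+1, c_index-2],
--         [r_index-1, c_index-2],
--         [r_index+2, c_index+1],
--         [r_index+2, c_index-1],
--         [r_index-2, c_index+1],
--         [r_index-2, c_index-1]
--     ]
--
--     for cordinates in moveslist:
--         index_r = cordinates[0]
--         index_c = cordinates[1]
--         if index_r in range(0,8) and index_c in range(0,8):
--             square = chess_board[index_r][index_c]
--             if square == " ":
--                 moves.append([index_r, index_c])
--             else:
--                 if square == enemies_king:
--                     continue
--                 if square in enemies_list :
--                     moves.append([index_r, index_c])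
--     return moves
--
-- def is_safe_from_knight(chess_board, r_index, c_index, piece):
--     if piece == "K":
--         knight_piece = "N"
--         enemy_knight = "n"
--     if piece == "k":
--         knight_piece = "n"
--         enemy_knight = "N"
--     knight_moves = knight_available_moves(chess_board, r_index, c_index, knight_piece)
--     for cordinates in knight_moves:
--         index_r = cordinates[0]
--         index_c = cordinates[1]
--         square = chess_board[index_r][index_c]
--         if square == enemy_knight:
--             return False, [index_r, index_c]
--     return True, None
-- ===== SOURCE B (Python) =====
-- _KNIGHT_OFFSETS = ((1, 2), (-1, 2), (1, -2), (-1, -2), (2, 1), (2, -1), (-2, 1), (-2, -1))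
--
-- def is_safe_from_knight(chess_board, r_index, c_index, piece):
--     enemy_knight = {"K": "n", "k": "N"}[piece]
--     for dr, dc in _KNIGHT_OFFSETS:
--         r, c = r_index + dr, c_index + dc
--         if 0 <= r < 8 and 0 <= c < 8 and chess_board[r][c] == enemy_knight:
--             return False, [r, c]
--     return True, None
-- ===== Notes on version B (the rewrite author's own statement) =====
-- stated objective: simpler
-- what changed: B drops A's two-phase build-a-candidate-move-list-then-rescan (with blank/enemy/enemy-king classification via get_enemies_list) and instead makes a single direct pass over the 8 knight offsets, returning at the first in-board square holding the enemy knight.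
import Mathlib
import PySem

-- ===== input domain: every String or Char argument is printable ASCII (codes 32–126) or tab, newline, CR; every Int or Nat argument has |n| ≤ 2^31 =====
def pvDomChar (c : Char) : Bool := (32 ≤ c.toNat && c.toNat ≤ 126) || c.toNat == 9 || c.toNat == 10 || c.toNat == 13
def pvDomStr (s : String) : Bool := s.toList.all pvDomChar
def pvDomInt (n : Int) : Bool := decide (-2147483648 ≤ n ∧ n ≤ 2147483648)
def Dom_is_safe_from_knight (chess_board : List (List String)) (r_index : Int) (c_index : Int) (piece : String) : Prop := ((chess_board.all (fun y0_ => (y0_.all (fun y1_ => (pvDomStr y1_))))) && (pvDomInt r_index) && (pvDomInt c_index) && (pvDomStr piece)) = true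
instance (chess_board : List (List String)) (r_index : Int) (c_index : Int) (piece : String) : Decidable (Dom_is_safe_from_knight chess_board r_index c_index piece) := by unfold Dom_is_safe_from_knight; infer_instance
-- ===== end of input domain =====

-- B replaces A's build-candidate-list-then-rescan by one direct pass over the 8 knight
-- offsets; objective: simpler. Equal return values on Pre_ (where A raises no exception).

-- chess_board[r][c] for Python ints r, c (used only at in-range indices inside Pre_;
-- out of range Python raises IndexError, which Pre_ excludes — default values unreachable there)
def pyAt2 (chess_board : List (List String)) (r c : Int) : String :=
  (PySem.List.pyGet? ((PySem.List.pyGet? chess_board r).getD []) c).getD ""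

-- cordinates[0] / cordinates[1] on a move [r, c]
def coord0 (cd : List Int) : Int := (PySem.List.pyGet? cd 0).getD 0
def coord1 (cd : List Int) : Int := (PySem.List.pyGet? cd 1).getD 0

-- ===== PORT A =====
def get_enemies_list (piece : String) (king : Bool) : List String :=
  let whitelist := ["P", "N", "B", "R", "Q"]
  let blacklist := ["p", "n", "b", "r", "q"]
  if king ∧ piece = "K" then blacklist
  else if king ∧ piece = "k" then whitelist
  else if whitelist.contains piece then blacklist
  else whitelist

def knight_available_moves (chess_board : List (List String)) (r_index : Int) (c_index : Int) (piece : String) : List (List Int) :=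
  let enemies_list := get_enemies_list piece false
  let enemies_king := if piece = "n" then "K" else "k"
  let moveslist : List (List Int) := [
    [r_index+1, c_index+2],
    [r_index-1, c_index+2],
    [r_index+1, c_index-2],
    [r_index-1, c_index-2],
    [r_index+2, c_index+1],
    [r_index+2, c_index-1],
    [r_index-2, c_index+1],
    [r_index-2, c_index-1]]
  moveslist.foldl (fun moves cordinates =>
    let index_r := coord0 cordinates
    let index_c := coord1 cordinates
    if 0 ≤ index_r ∧ index_r < 8 ∧ 0 ≤ index_c ∧ index_c < 8 then
      let square := pyAt2 chess_board index_r index_c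
      if square = " " then moves ++ [[index_r, index_c]]
      else if square = enemies_king then moves
      else if enemies_list.contains square then moves ++ [[index_r, index_c]]
      else moves
    else moves) []

-- the final 'for cordinates in knight_moves: … return False, …' loop of A
def scanMoves (chess_board : List (List String)) (enemy_knight : String) : List (List Int) → Bool × Option (List Int)
  | [] => (true, none)
  | cordinates :: rest =>
    let index_r := coord0 cordinates
    let index_c := coord1 cordinates
    let square := pyAt2 chess_board index_r index_c
    if square = enemy_knight then (false, some [index_r, index_c])
    else scanMoves chess_board enemy_knight rest

def is_safe_from_knight (chess_board : List (List String)) (r_index : Int) (c_index : Int) (piece : String) : Bool × Option (List Int) :=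
  -- 'if piece == "K": …  if piece == "k": …'; any other piece raises NameError (excluded by Pre_),
  -- the "" defaults below are unreachable inside Pre_
  let knight_piece := if piece = "K" then "N" else if piece = "k" then "n" else ""
  let enemy_knight := if piece = "K" then "n" else if piece = "k" then "N" else ""
  let knight_moves := knight_available_moves chess_board r_index c_index knight_piece
  scanMoves chess_board enemy_knight knight_moves

-- ===== PORT B =====
def altOffsets : List (Int × Int) := [(1, 2), (-1, 2), (1, -2), (-1, -2), (2, 1), (2, -1), (-2, 1), (-2, -1)]

def altGo (chess_board : List (List String)) (r_index : Int) (c_index : Int) (enemy_knight : String) : List (Int × Int) → Bool × Option (List Int)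
  | [] => (true, none)
  | (dr, dc) :: rest =>
    let r := r_index + dr
    let c := c_index + dc
    if 0 ≤ r ∧ r < 8 ∧ 0 ≤ c ∧ c < 8 ∧ pyAt2 chess_board r c = enemy_knight then (false, some [r, c])
    else altGo chess_board r_index c_index enemy_knight rest

def is_safe_from_knight_alt (chess_board : List (List String)) (r_index : Int) (c_index : Int) (piece : String) : Bool × Option (List Int) :=
  -- {"K": "n", "k": "N"}[piece]; a KeyError (piece not a king) is outside Pre_, "" unreachable there
  let enemy_knight := (PySem.Dict.get? (PySem.Dict.ofList [("K", "n"), ("k", "N")]) piece).getD ""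
  altGo chess_board r_index c_index enemy_knight altOffsets

-- ===== PRECONDITION & SPEC =====
-- Pre_ excludes exactly the inputs on which Python A raises: piece other than "K"/"k"
-- (NameError: knight_piece undefined), and boards too small for some in-range knight
-- destination square (IndexError on chess_board[r][c]).
def Pre_is_safe_from_knight (chess_board : List (List String)) (r_index : Int) (c_index : Int) (piece : String) : Prop :=
  (piece = "K" ∨ piece = "k") ∧
  ∀ d ∈ altOffsets,
    (0 ≤ r_index + d.1 ∧ r_index + d.1 < 8 ∧ 0 ≤ c_index + d.2 ∧ c_index + d.2 < 8) →
      (r_index + d.1).toNat < chess_board.length ∧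
      (c_index + d.2).toNat < (chess_board.getD (r_index + d.1).toNat []).length
instance (chess_board : List (List String)) (r_index : Int) (c_index : Int) (piece : String) : Decidable (Pre_is_safe_from_knight chess_board r_index c_index piece) := by unfold Pre_is_safe_from_knight; infer_instance

def pvWitness_is_safe_from_knight : List (List String) × Int × Int × String :=
  ([[" ", " ", " "], [" ", " ", " "], [" ", "n", " "]], 0, 0, "K")

def Spec_is_safe_from_knight (chess_board : List (List String)) (r_index : Int) (c_index : Int) (piece : String) (out : Bool × Option (List Int)) : Prop := out = is_safe_from_knight_alt chess_board r_index c_index piece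
instance (chess_board : List (List String)) (r_index : Int) (c_index : Int) (piece : String) (out : Bool × Option (List Int)) : Decidable (Spec_is_safe_from_knight chess_board r_index c_index piece out) := by unfold Spec_is_safe_from_knight; infer_instance

-- ===== CLAIM (what is proved, stated in full; the proofs are below) =====
def Claim_equal_is_safe_from_knight : Prop := ∀ (chess_board : List (List String)) (r_index : Int) (c_index : Int) (piece : String), Dom_is_safe_from_knight chess_board r_index c_index piece → Pre_is_safe_from_knight chess_board r_index c_index piece → Spec_is_safe_from_knight chess_board r_index c_index piece (is_safe_from_knight chess_board r_index c_index piece)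

-- ===== LEMMAS AND PROOFS =====

-- single-pass scan over raw coordinate lists (proof-only bridge between A's two phases and B's one pass)
def scanDirect (chess_board : List (List String)) (ek : String) : List (List Int) → Bool × Option (List Int)
  | [] => (true, none)
  | cd :: rest =>
    if 0 ≤ coord0 cd ∧ coord0 cd < 8 ∧ 0 ≤ coord1 cd ∧ coord1 cd < 8 ∧
        pyAt2 chess_board (coord0 cd) (coord1 cd) = ek then (false, some [coord0 cd, coord1 cd])
    else scanDirect chess_board ek rest

theorem coord0_pair (x y : Int) : coord0 [x, y] = x := rfl
theorem coord1_pair (x y : Int) : coord1 [x, y] = y := rfl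

theorem scan_fst_true (b : List (List String)) (ek : String) :
    ∀ l, (scanMoves b ek l).1 = true → scanMoves b ek l = (true, none) := by
  intro l
  induction l with
  | nil => intro _; rfl
  | cons cd rest ih =>
    simp only [scanMoves]
    split_ifs
    · intro h; simp at h
    · exact ih

theorem scan_append (b : List (List String)) (ek : String) :
    ∀ l1 l2, scanMoves b ek (l1 ++ l2) =
      if (scanMoves b ek l1).1 = true then scanMoves b ek l2 else scanMoves b ek l1 := by
  intro l1 l2
  induction l1 with
  | nil => simp [scanMoves]
  | cons cd rest ih =>
    simp only [List.cons_append, scanMoves]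
    by_cases h : pyAt2 b (coord0 cd) (coord1 cd) = ek
    · rw [if_pos h, if_pos h]; simp
    · rw [if_neg h, if_neg h, ih]

theorem main_fold (b : List (List String)) (ek : String) (elist : List String) (eking : String)
    (hmem : elist.contains ek = true) (hk : ek ≠ eking) (hsp : ek ≠ " ") :
    ∀ (l acc : List (List Int)),
      scanMoves b ek (l.foldl (fun moves cordinates =>
        let index_r := coord0 cordinates
        let index_c := coord1 cordinates
        if 0 ≤ index_r ∧ index_r < 8 ∧ 0 ≤ index_c ∧ index_c < 8 then
          let square := pyAt2 b index_r index_c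
          if square = " " then moves ++ [[index_r, index_c]]
          else if square = eking then moves
          else if elist.contains square then moves ++ [[index_r, index_c]]
          else moves
        else moves) acc)
      = if (scanMoves b ek acc).1 = true then scanDirect b ek l else scanMoves b ek acc := by
  intro l
  induction l with
  | nil =>
    intro acc
    simp only [List.foldl_nil]
    split_ifs with h
    · exact scan_fst_true b ek acc h
    · rfl
  | cons cd rest ih =>
    intro acc
    rw [List.foldl_cons, ih]
    by_cases hf : (scanMoves b ek acc).1 = true
    · have hacc := scan_fst_true b ek acc hf
      by_cases hin : 0 ≤ coord0 cd ∧ coord0 cd < 8 ∧ 0 ≤ coord1 cd ∧ coord1 cd < 8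
      · simp only [if_pos hin]
        by_cases hek : pyAt2 b (coord0 cd) (coord1 cd) = ek
        · -- the square holds the enemy knight: A records it and its rescan stops there,
          -- exactly where the direct scan stops
          have hstep : (if pyAt2 b (coord0 cd) (coord1 cd) = " " then acc ++ [[coord0 cd, coord1 cd]]
              else if pyAt2 b (coord0 cd) (coord1 cd) = eking then acc
              else if elist.contains (pyAt2 b (coord0 cd) (coord1 cd)) = true then acc ++ [[coord0 cd, coord1 cd]]
              else acc) = acc ++ [[coord0 cd, coord1 cd]] := by
            rw [hek, if_neg hsp, if_neg hk, if_pos hmem]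
          have hs : scanMoves b ek (acc ++ [[coord0 cd, coord1 cd]]) = (false, some [coord0 cd, coord1 cd]) := by
            rw [scan_append b ek, if_pos hf]
            simp [scanMoves, coord0_pair, coord1_pair, hek]
          have hc : 0 ≤ coord0 cd ∧ coord0 cd < 8 ∧ 0 ≤ coord1 cd ∧ coord1 cd < 8 ∧
              pyAt2 b (coord0 cd) (coord1 cd) = ek := ⟨hin.1, hin.2.1, hin.2.2.1, hin.2.2.2, hek⟩
          rw [hstep]
          simp only [hs, if_pos hf, scanDirect, if_pos hc]
          simp
        · -- not the enemy knight: whether or not A records the square, both scans move on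
          have hrhs : scanDirect b ek (cd :: rest) = scanDirect b ek rest := by
            rw [scanDirect, if_neg (fun hc => hek hc.2.2.2.2)]
          have hs : scanMoves b ek (acc ++ [[coord0 cd, coord1 cd]]) = (true, none) := by
            rw [scan_append b ek, if_pos hf]
            simp [scanMoves, coord0_pair, coord1_pair, hek]
          simp only [if_pos hf, hrhs]
          by_cases h1 : pyAt2 b (coord0 cd) (coord1 cd) = " "
          · simp only [if_pos h1, hs]; simp
          · simp only [if_neg h1]
            by_cases h2 : pyAt2 b (coord0 cd) (coord1 cd) = eking
            · simp only [if_pos h2, if_pos hf]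
            · simp only [if_neg h2]
              by_cases h3 : elist.contains (pyAt2 b (coord0 cd) (coord1 cd)) = true
              · simp only [if_pos h3, hs]; simp
              · simp only [if_neg h3, if_pos hf]
      · -- destination off the board: A records nothing, B skips
        simp only [if_neg hin, if_pos hf]
        rw [scanDirect, if_neg (fun hc => hin ⟨hc.1, hc.2.1, hc.2.2.1, hc.2.2.2.1⟩)]
    · -- the accumulator has already produced the (false, _) answer; nothing changes it
      by_cases hin : 0 ≤ coord0 cd ∧ coord0 cd < 8 ∧ 0 ≤ coord1 cd ∧ coord1 cd < 8
      · simp only [if_pos hin]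
        have key : ∀ x, scanMoves b ek (acc ++ x) = scanMoves b ek acc := by
          intro x; rw [scan_append b ek, if_neg hf]
        by_cases h1 : pyAt2 b (coord0 cd) (coord1 cd) = " "
        · simp only [if_pos h1, key, if_neg hf]
        · simp only [if_neg h1]
          by_cases h2 : pyAt2 b (coord0 cd) (coord1 cd) = eking
          · simp only [if_pos h2, if_neg hf]
          · simp only [if_neg h2]
            by_cases h3 : elist.contains (pyAt2 b (coord0 cd) (coord1 cd)) = true
            · simp only [if_pos h3, key, if_neg hf]
            · simp only [if_neg h3, if_neg hf]
      · simp only [if_neg hin, if_neg hf]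

theorem scanDirect_concrete (b : List (List String)) (rI cI : Int) (ek : String) :
    scanDirect b ek [[rI+1, cI+2], [rI-1, cI+2], [rI+1, cI-2], [rI-1, cI-2],
                     [rI+2, cI+1], [rI+2, cI-1], [rI-2, cI+1], [rI-2, cI-1]]
      = altGo b rI cI ek altOffsets := by
  simp only [scanDirect, altGo, altOffsets, coord0_pair, coord1_pair, sub_eq_add_neg]

-- ===== VERDICT (by name: the statement is the Claim_ definition above) =====
theorem is_safe_from_knight_spec : Claim_equal_is_safe_from_knight := by
  intro chess_board r_index c_index piece _hdom hpre
  unfold Spec_is_safe_from_knight is_safe_from_knight is_safe_from_knight_alt knight_available_moves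
  rcases hpre.1 with hK | hK <;> subst hK <;>
    simp only [String.reduceEq, reduceIte] <;>
    rw [main_fold _ _ _ _ (by decide) (by decide) (by decide), scanDirect_concrete] <;> rfl
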